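-- pv_equiv track=rewrite | github.com/KenyC/Segmentation | ForwardModel.py | auxSegment
-- ===== SOURCE A (Python) =====
-- def auxSegment(path, word):
-- 	path = path[1:]
--
-- 	segments = []
-- 	current = ""
--
-- 	for idx, state in enumerate(path):
-- 		current += word[idx]
--
-- 		if state == 0:
-- 			segments.append(current)
-- 			current = ""
--
-- 	return segments
-- ===== SOURCE B (Python) =====
-- def auxSegment(path, word):
--     # boundary positions: indices (into word) where the path state is 0
--     cuts = [i for i, s in enumerate(path[1:]) if s == 0]
--     segments = []
--     start = 0
--     for c in cuts:
--         segments.append(word[start:c + 1])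
--         start = c + 1
--     return segments
-- ===== Notes on version B (the rewrite author's own statement) =====
-- stated objective: alternative
-- what changed: B first computes the list of cut positions (states equal to 0) and then builds each segment with one slice of word between consecutive cuts, instead of A's per-character accumulation of a growing string inside the enumerate loop.
import Mathlib
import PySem

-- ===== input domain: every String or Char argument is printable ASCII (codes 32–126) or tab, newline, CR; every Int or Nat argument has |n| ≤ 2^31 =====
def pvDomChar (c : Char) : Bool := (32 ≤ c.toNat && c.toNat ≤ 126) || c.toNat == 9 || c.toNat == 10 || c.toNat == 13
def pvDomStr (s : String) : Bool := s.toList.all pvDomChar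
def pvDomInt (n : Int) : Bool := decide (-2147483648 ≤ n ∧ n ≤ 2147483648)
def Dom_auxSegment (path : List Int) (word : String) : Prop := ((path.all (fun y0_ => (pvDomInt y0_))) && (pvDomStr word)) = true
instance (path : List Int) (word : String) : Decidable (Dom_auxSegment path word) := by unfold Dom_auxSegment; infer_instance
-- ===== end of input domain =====

-- B rebuilds the result from cut positions and word slices instead of A's per-character string accumulation; equal return values on Pre_ (A raises IndexError outside it).

-- ===== PORT A =====
-- A's for-loop over enumerate(path[1:]) carrying (segments, current); word[idx] via pyGet? (none = IndexError, excluded by Pre_)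
def auxSegmentLoopA (w : List Char) : List (Int × Int) → List String → List Char → List String
  | [], segs, _ => segs
  | (idx, state) :: rest, segs, cur =>
      let cur' := cur ++ (PySem.List.pyGet? w idx).toList
      if state = 0 then auxSegmentLoopA w rest (segs ++ [String.ofList cur']) []
      else auxSegmentLoopA w rest segs cur'

def auxSegment (path : List Int) (word : String) : List String :=
  auxSegmentLoopA word.toList (PySem.List.enumerate (PySem.List.slice path (some 1) none) 0) [] []

-- ===== PORT B =====
def auxSegment_alt (path : List Int) (word : String) : List String :=
  let cuts := (PySem.List.enumerate (PySem.List.slice path (some 1) none) 0).filterMap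
      (fun p => if p.2 = 0 then some p.1 else none)
  (cuts.foldl (fun (acc : List String × Int) c =>
      (acc.1 ++ [String.ofList (PySem.List.slice word.toList (some acc.2) (some (c + 1)))], c + 1))
    ([], 0)).1

-- ===== PRECONDITION & SPEC =====
-- Pre_ excludes exactly the inputs where A raises IndexError (word shorter than len(path)-1)
def Pre_auxSegment (path : List Int) (word : String) : Prop :=
  path.length ≤ word.toList.length + 1
instance (path : List Int) (word : String) : Decidable (Pre_auxSegment path word) := by unfold Pre_auxSegment; infer_instance

def pvWitness_auxSegment : List Int × String := ([0, 1, 0], "ab")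

def Spec_auxSegment (path : List Int) (word : String) (out : List String) : Prop := out = auxSegment_alt path word
instance (path : List Int) (word : String) (out : List String) : Decidable (Spec_auxSegment path word out) := by unfold Spec_auxSegment; infer_instance

-- ===== CLAIM (what is proved, stated in full; the proofs are below) =====
def Claim_equal_auxSegment : Prop := ∀ (path : List Int) (word : String), Dom_auxSegment path word → Pre_auxSegment path word → Spec_auxSegment path word (auxSegment path word)

-- ===== LEMMAS AND PROOFS =====

-- the segments B's fold produces from a list of cut positions, starting at `start`
def segsOf (w : List Char) : List Int → Int → List String
  | [], _ => []
  | c :: cs, start =>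
      String.ofList (PySem.List.slice w (some start) (some (c + 1))) :: segsOf w cs (c + 1)

-- the cut positions of the path tail ts, enumerated from s
def cutsOf (ts : List Int) (s : Int) : List Int :=
  (PySem.List.enumerate ts s).filterMap (fun p => if p.2 = 0 then some p.1 else none)

lemma cutsOf_nil (s : Int) : cutsOf [] s = [] := by
  simp [cutsOf, PySem.List.enumerate_nil]

lemma cutsOf_cons (t : Int) (rest : List Int) (s : Int) :
    cutsOf (t :: rest) s = if t = 0 then s :: cutsOf rest (s + 1) else cutsOf rest (s + 1) := by
  by_cases ht : t = 0 <;> simp [cutsOf, PySem.List.enumerate_cons, ht]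

lemma foldB_eq (w : List Char) (cuts : List Int) : ∀ (segs : List String) (start : Int),
    (cuts.foldl (fun (acc : List String × Int) c =>
        (acc.1 ++ [String.ofList (PySem.List.slice w (some acc.2) (some (c + 1)))], c + 1))
      (segs, start)).1
    = segs ++ segsOf w cuts start := by
  induction cuts with
  | nil => intro segs start; simp [segsOf]
  | cons c cs ih => intro segs start; simp [List.foldl, segsOf, ih]

lemma loopA_eq (w : List Char) : ∀ (ts : List Int) (k start : Nat) (segs : List String),
    start ≤ k → k + ts.length ≤ w.length →
    auxSegmentLoopA w (PySem.List.enumerate ts (k : Int)) segs ((w.drop start).take (k - start))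
      = segs ++ segsOf w (cutsOf ts (k : Int)) (start : Int) := by
  intro ts
  induction ts with
  | nil =>
      intro k start segs h1 h2
      simp [PySem.List.enumerate_nil, auxSegmentLoopA, cutsOf_nil, segsOf]
  | cons t rest ih =>
      intro k start segs h1 h2
      have hk : k < w.length := by simp at h2; omega
      rw [PySem.List.enumerate_cons]
      have hcast : (k : Int) + 1 = ((k + 1 : Nat) : Int) := by push_cast; ring
      have hcur : (w.drop start).take (k - start) ++ (PySem.List.pyGet? w (k : Int)).toList
          = (w.drop start).take (k + 1 - start) := by
        rw [PySem.List.pyGet?_natCast]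
        have hs : k + 1 - start = (k - start) + 1 := by omega
        rw [hs, List.take_add_one, List.getElem?_drop]
        have hidx : start + (k - start) = k := by omega
        rw [hidx]
      simp only [auxSegmentLoopA, hcur]
      have hslice : PySem.List.slice w (some (start : Int)) (some ((k : Int) + 1))
          = (w.drop start).take (k + 1 - start) := by
        rw [hcast, PySem.List.slice_natCast]
      have hrec : k + 1 + rest.length ≤ w.length := by
        simp [List.length_cons] at h2; omega
      by_cases ht : t = 0
      · subst ht
        rw [if_pos rfl]
        have hnil : ([] : List Char) = (w.drop (k + 1)).take ((k + 1) - (k + 1)) := by simp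
        rw [hnil, hcast, ih (k + 1) (k + 1) _ (le_refl _) hrec]
        rw [cutsOf_cons, if_pos rfl]
        simp only [segsOf]
        rw [hslice, hcast]
        simp
      · rw [if_neg ht]
        rw [hcast, ih (k + 1) start _ (by omega) hrec]
        rw [cutsOf_cons, if_neg ht, hcast]

-- ===== VERDICT (by name: the statement is the Claim_ definition above) =====
theorem auxSegment_spec : Claim_equal_auxSegment := by
  unfold Claim_equal_auxSegment
  intro path word _ hpre
  unfold Spec_auxSegment
  simp only [auxSegment, auxSegment_alt, PySem.List.slice_from_one]
  rw [foldB_eq]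
  have hlen : path.tail.length ≤ word.toList.length := by
    unfold Pre_auxSegment at hpre
    have ht : path.tail.length = path.length - 1 := List.length_tail
    omega
  have h := loopA_eq word.toList path.tail 0 0 [] (le_refl 0) (by omega)
  simpa [cutsOf] using h
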